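-- pv_equiv track=rewrite | github.com/hkle2/Algorithm_study_2024 | 프로그래머스/Python3/0/120896. 한 번만 등장한 문자/한 번만 등장한 문자.py | solution
-- ===== SOURCE A (Python) =====
-- def solution(s):
--     answer = ''
--     dict = {}
--     for i in s:
--         if i not in dict:
--             dict[i] = 0
--         dict[i] += 1
--     for key, value in dict.items():
--         if value == 1:
--             answer += key
--     answer = "".join(sorted(answer))
--     return answer
-- ===== SOURCE B (Python) =====
-- def _scan(t):
--     # t is sorted; keep the first char of each run of length exactly 1
--     if not t:
--         return ''
--     c = t[0]
--     k = 1
--     while k < len(t) and t[k] == c: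
--         k += 1
--     return (c if k == 1 else '') + _scan(t[k:])
--
--
-- def solution(s):
--     return _scan(sorted(s))
-- ===== Notes on version B (the rewrite author's own statement) =====
-- stated objective: alternative
-- what changed: Replaced the dict frequency table plus final sort with a sort-first strategy: sort the characters once, then a single grouped scan over equal runs emits exactly the length-1 runs, already in order.
import Mathlib
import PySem

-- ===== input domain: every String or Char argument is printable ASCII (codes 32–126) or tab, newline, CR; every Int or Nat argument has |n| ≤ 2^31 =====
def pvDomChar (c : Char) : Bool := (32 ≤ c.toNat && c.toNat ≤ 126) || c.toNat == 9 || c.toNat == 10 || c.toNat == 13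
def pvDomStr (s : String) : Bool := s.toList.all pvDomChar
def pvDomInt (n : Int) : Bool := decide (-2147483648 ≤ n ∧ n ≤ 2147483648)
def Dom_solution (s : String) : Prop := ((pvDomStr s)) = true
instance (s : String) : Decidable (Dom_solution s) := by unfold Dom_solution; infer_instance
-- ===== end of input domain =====

-- B replaces A's dict frequency table + final sort with a sort-then-grouped-scan (alternative decomposition, same result).

-- ===== PORT A =====
def solution (s : String) : String :=
  let d := s.toList.foldl (fun d i =>
    let d := if d.contains i then d else d.insert i (0 : Int)
    d.insert i (d.getD i 0 + 1)) PySem.Dict.empty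
  let answer := d.items.foldl (fun acc kv => if kv.2 == 1 then acc ++ [kv.1] else acc) ([] : List Char)
  String.mk (PySem.List.sorted answer (fun x => x) false)

-- ===== PORT B =====
-- port of Source B's _scan: the run of chars equal to t[0] has length k (the while loop);
-- keep t[0] iff the run has length 1, recurse on the rest of the list after the run
def scanRuns : List Char → List Char
  | [] => []
  | c :: rest =>
    let run := rest.takeWhile (fun x => x == c)
    (if run.length = 0 then [c] else []) ++ scanRuns (rest.dropWhile (fun x => x == c))
termination_by t => t.length
decreasing_by
  simp only [List.length_cons]
  exact Nat.lt_succ_of_le (List.length_dropWhile_le _ _)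

def solution_alt (s : String) : String :=
  String.mk (scanRuns (PySem.List.sorted s.toList (fun x => x) false))

-- ===== PRECONDITION & SPEC =====
def Spec_solution (s : String) (out : String) : Prop := out = solution_alt s
instance (s : String) (out : String) : Decidable (Spec_solution s out) := by unfold Spec_solution; infer_instance

-- ===== CLAIM (what is proved, stated in full; the proofs are below) =====
def Claim_equal_solution : Prop := ∀ (s : String), Dom_solution s → Spec_solution s (solution s)

-- ===== LEMMAS AND PROOFS =====

-- A's loop body is exactly the Counter step
theorem step_eq_counter_step (d : PySem.Dict Char Int) (i : Char) :
    (let d' := if d.contains i then d else d.insert i (0 : Int)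
     d'.insert i (d'.getD i 0 + 1)) = d.insert i (d.getD i 0 + 1) := by
  by_cases h : d.contains i = true
  · simp [h]
  · simp only [Bool.not_eq_true] at h
    simp [h, PySem.Dict.getD_insert_self, PySem.Dict.insert_insert_self,
      PySem.Dict.getD_of_not_contains d 0 h]

theorem dict_eq_counter (l : List Char) :
    l.foldl (fun d i =>
      let d := if d.contains i then d else d.insert i (0 : Int)
      d.insert i (d.getD i 0 + 1)) PySem.Dict.empty = PySem.Dict.counter l := by
  rw [← PySem.Dict.foldl_insert_getD_add_one_eq_counter]
  apply PySem.List.foldl_congr_mem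
  intro acc x _
  exact step_eq_counter_step acc x

-- in a sorted list, no element after the dropped run equals the head
theorem no_head_in_rest (c : Char) : ∀ (rest : List Char),
    rest.Pairwise (· ≤ ·) → (∀ x ∈ rest, c ≤ x) →
    ∀ x ∈ rest.dropWhile (fun x => x == c), x ≠ c := by
  intro rest
  induction rest with
  | nil => intro _ _ x hx; simp [List.dropWhile] at hx
  | cons a r ih =>
    intro hp hge x hx
    rcases List.pairwise_cons.mp hp with ⟨har, hr⟩
    by_cases ha : (a == c) = true
    · have hac : a = c := by simpa using ha
      simp only [List.dropWhile_cons, ha, if_true] at hx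
      exact ih hr (fun y hy => hac ▸ har y hy) x hx
    · have haf : (a == c) = false := by simpa using ha
      simp only [List.dropWhile_cons, haf, Bool.false_eq_true, if_false, List.mem_cons] at hx
      have hane : a ≠ c := by simpa using ha
      have hca : c < a := lt_of_le_of_ne (hge a (by simp)) (Ne.symm hane)
      rcases hx with hx | hx
      · exact hx ▸ hane
      · exact fun hxc => absurd (hxc ▸ har x hx) (not_le_of_gt hca)

-- the grouped scan over a sorted list keeps exactly the count-1 characters
theorem scanRuns_sorted_eq_filter : ∀ (t : List Char), t.Pairwise (· ≤ ·) →
    scanRuns t = t.filter (fun x => t.count x == 1) := by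
  intro t
  induction t using scanRuns.induct with
  | case1 => intro _; simp [scanRuns]
  | case2 c rest ih =>
    intro hp
    rcases List.pairwise_cons.mp hp with ⟨hge, hrest⟩
    set run := rest.takeWhile (fun x => x == c) with hrun
    have hsplit : rest = run ++ rest.dropWhile (fun x => x == c) := by
      rw [hrun]; exact (List.takeWhile_append_dropWhile (p := fun x => x == c) (l := rest)).symm
    set rest' := rest.dropWhile (fun x => x == c) with hrest'
    have hrunc : ∀ x ∈ run, x = c := by
      intro x hx
      simpa using List.mem_takeWhile_imp hx
    have hrest'p : rest'.Pairwise (· ≤ ·) := List.Pairwise.sublist (List.dropWhile_sublist _) hrest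
    have hnoc : ∀ x ∈ rest', x ≠ c := no_head_in_rest c rest hrest (fun x hx => hge x hx)
    have hcount_c : (c :: rest).count c = 1 + run.length := by
      rw [List.count_cons_self, hsplit, List.count_append]

      have h1 : run.count c = run.length := by
        rw [List.count_eq_length]; intro x hx; exact ((hrunc x hx) ▸ rfl)
      have h2 : rest'.count c = 0 := by
        rw [List.count_eq_zero]; intro hmem; exact hnoc c hmem rfl
      omega
    have hcount_x : ∀ x ∈ rest', (c :: rest).count x = rest'.count x := by
      intro x hx
      have hxc : x ≠ c := hnoc x hx
      have h0 : run.count x = 0 := by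
        rw [List.count_eq_zero]; intro hmem; exact hxc (hrunc x hmem)
      have h1 : List.count x (c :: rest) = List.count x rest := by
        have hb : (x == c) = false := by simpa using hxc
        simp [List.count_cons]
        exact fun h => hxc h.symm
      rw [h1, hsplit, List.count_append, h0, Nat.zero_add]
    have hfc : ∀ (p : Char → Bool), (c :: rest).filter p
        = (if p c then [c] else []) ++ run.filter p ++ rest'.filter p := by
      intro p
      rw [List.filter_cons, hsplit, List.filter_append]
      by_cases hpc : p c = true
      · simp [hpc]
      · simp [hpc]
    have hrunfilter : run.filter (fun x => List.count x (c :: rest) == 1) = [] := by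
      rw [List.filter_eq_nil_iff]
      intro x hx
      have hlen : run.length ≠ 0 := by
        intro h0; rw [List.length_eq_zero_iff] at h0; rw [h0] at hx; simp at hx
      rw [hrunc x hx, hcount_c]
      simp only [beq_iff_eq]
      omega
    have hrestfilter : rest'.filter (fun x => List.count x (c :: rest) == 1)
        = rest'.filter (fun x => List.count x rest' == 1) := by
      apply List.filter_congr; intro x hx; rw [hcount_x x hx]
    rw [scanRuns, hfc (fun x => List.count x (c :: rest) == 1), hrunfilter, hrestfilter,
      ← ih hrest'p]
    simp only [← hrun, ← hrest', List.append_nil]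
    by_cases hz : run.length = 0
    · have hp1 : (List.count c (c :: rest) == 1) = true := by simp [hcount_c, hz]
      rw [if_pos hz, if_pos hp1]
    · have hp1 : ¬ ((List.count c (c :: rest) == 1) = true) := by
        simp only [hcount_c, beq_iff_eq]; omega
      rw [if_neg hz, if_neg hp1]

-- the filtered list has no duplicates (each kept char occurs once in t)
theorem filter_count_one_nodup (t : List Char) :
    (t.filter (fun x => t.count x == 1)).Nodup := by
  rw [List.nodup_iff_count_le_one]
  intro a
  by_cases ha : (List.count a t == 1) = true
  · have h1 : List.count a t = 1 := by simpa using ha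
    have hle := List.Sublist.count_le a
      (List.filter_sublist (p := fun x => List.count x t == 1) (l := t))
    omega
  · have hnm : a ∉ t.filter (fun x => List.count x t == 1) := by
      simp only [List.mem_filter]
      rintro ⟨-, hpa⟩; exact ha hpa
    simp [List.count_eq_zero_of_not_mem hnm]

-- the filtered sorted list is strictly increasing
theorem filter_sorted_pairwise_lt (t : List Char) (h : t.Pairwise (· ≤ ·)) :
    (t.filter (fun x => t.count x == 1)).Pairwise (· < ·) := by
  have hle : (t.filter (fun x => t.count x == 1)).Pairwise (· ≤ ·) :=
    List.Pairwise.sublist List.filter_sublist h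
  exact (hle.and (filter_count_one_nodup t)).imp (fun hab => lt_of_le_of_ne hab.1 hab.2)

-- ===== VERDICT (by name: the statement is the Claim_ definition above) =====
theorem solution_spec : Claim_equal_solution := by
  intro s _
  simp only [Spec_solution, solution, solution_alt]
  set l := s.toList with hl
  set t := PySem.List.sorted l (fun x => x) false with ht
  have htp : t.Pairwise (· ≤ ·) := PySem.List.sorted_pairwise l (fun x => x)
  have htperm : t.Perm l := PySem.List.sorted_perm l (fun x => x) false
  rw [dict_eq_counter, PySem.Dict.items_counter]
  rw [PySem.List.foldl_append_if (p := fun kv : Char × Int => kv.2 == 1) (f := fun kv => kv.1)]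
  rw [scanRuns_sorted_eq_filter t htp]
  congr 1
  rw [List.filter_map, List.map_map]
  simp only [List.nil_append, Function.comp_def]
  -- A's list before sorting: count-1 chars in first-occurrence order
  apply PySem.List.sorted_eq_of_perm_of_pairwise_lt
  · -- permutation of the two nodup lists with equal membership
    rw [List.perm_ext_iff_of_nodup]
    · intro a
      constructor
      · intro ha
        rw [List.mem_filter] at ha
        have hmem : a ∈ l := htperm.mem_iff.mp ha.1
        have hcnt : l.count a = 1 := by
          have := ha.2; rw [htperm.count_eq] at this; simpa using this
        simp only [List.mem_map, List.mem_filter]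
        refine ⟨a, ⟨(PySem.Set.mem_ofList l a).mpr hmem, by simp [hcnt]⟩, rfl⟩
      · intro ha
        simp only [List.mem_map, List.mem_filter] at ha
        rcases ha with ⟨b, ⟨hbmem, hbcnt⟩, rfl⟩
        have hbl : b ∈ l := (PySem.Set.mem_ofList l b).mp hbmem
        have hcnt : l.count b = 1 := by
          have : (l.count b : Int) = 1 := by simpa using hbcnt
          exact_mod_cast this
        rw [List.mem_filter]
        exact ⟨htperm.mem_iff.mpr hbl, by rw [htperm.count_eq]; simp [hcnt]⟩
    · exact filter_count_one_nodup t
    · -- map of filter of ofList nodup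
      apply List.Nodup.map_on
      · intro x _ y _ h; exact h
      · exact (PySem.Set.nodup_ofList l).filter _
  · exact filter_sorted_pairwise_lt t htp
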